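-- pv_equiv track=rewrite | github.com/h-sameri/LUKSense | security.py | can_create_user
-- ===== SOURCE A (Python) =====
-- reserved_usernames = []
--
-- def can_create_user(user_id):
--     if user_id in reserved_usernames:
--         return False
--     else:
--         for ch in user_id:
--             if ch not in 'abcdefghijklmnopqrstuvwxyz_0123456789':
--                 return False
--         return True
-- ===== SOURCE B (Python) =====
-- reserved_usernames = []
--
-- def can_create_user(user_id):
--     if user_id in reserved_usernames:
--         return False
--     return user_id.strip('abcdefghijklmnopqrstuvwxyz_0123456789') == ''
-- ===== Notes on version B (the rewrite author's own statement) =====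
-- stated objective: simpler
-- what changed: The per-character early-return loop is replaced by str.strip of the allowed alphabet from both ends followed by an emptiness check: a disallowed character anywhere survives the strip, so the result is empty iff every character is allowed.
import Mathlib
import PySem

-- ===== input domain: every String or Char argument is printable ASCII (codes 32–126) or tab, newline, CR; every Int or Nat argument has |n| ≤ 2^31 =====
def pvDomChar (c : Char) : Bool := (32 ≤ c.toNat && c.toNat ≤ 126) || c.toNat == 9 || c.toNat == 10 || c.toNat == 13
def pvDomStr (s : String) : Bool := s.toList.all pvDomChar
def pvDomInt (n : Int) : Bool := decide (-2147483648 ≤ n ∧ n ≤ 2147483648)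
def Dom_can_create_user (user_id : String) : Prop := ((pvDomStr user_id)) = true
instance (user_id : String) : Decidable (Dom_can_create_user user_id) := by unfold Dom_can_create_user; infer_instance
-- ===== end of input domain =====

-- B replaces A's per-character early-return loop by str.strip of the allowed characters followed by an emptiness test (simpler, same cost).


-- ===== PORT A =====
-- reserved_usernames = []
def reserved_usernames : List String := []

-- 'for ch in user_id: if ch not in '…': return False / return True' — structural recursion with early return
def pvLoopA : List Char → Bool
  | [] => true
  | c :: rest =>
    if ¬ (("abcdefghijklmnopqrstuvwxyz_0123456789".toList).contains c) then false
    else pvLoopA rest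

def can_create_user (user_id : String) : Bool :=
  if reserved_usernames.contains user_id then false
  else pvLoopA user_id.toList

-- ===== PORT B =====
-- return user_id.strip('abcdefghijklmnopqrstuvwxyz_0123456789') == ''
def can_create_user_alt (user_id : String) : Bool :=
  if reserved_usernames.contains user_id then false
  else PySem.Str.stripChars user_id "abcdefghijklmnopqrstuvwxyz_0123456789" == ""

-- ===== PRECONDITION & SPEC =====
def Spec_can_create_user (user_id : String) (out : Bool) : Prop := out = can_create_user_alt user_id
instance (user_id : String) (out : Bool) : Decidable (Spec_can_create_user user_id out) := by unfold Spec_can_create_user; infer_instance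

-- ===== CLAIM (what is proved, stated in full; the proofs are below) =====
def Claim_equal_can_create_user : Prop := ∀ (user_id : String), Dom_can_create_user user_id → Spec_can_create_user user_id (can_create_user user_id)

-- ===== LEMMAS AND PROOFS =====

-- A's loop returns true iff every character of the list lies in the allowed string
theorem pvLoopA_eq_all (l : List Char) :
    pvLoopA l = l.all (fun c => ("abcdefghijklmnopqrstuvwxyz_0123456789".toList).contains c) := by
  induction l with
  | nil => rfl
  | cons c rest ih =>
    simp only [pvLoopA, List.all_cons, ih]
    by_cases h : ("abcdefghijklmnopqrstuvwxyz_0123456789".toList).contains c <;> simp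

-- stripping a character set from both ends yields [] iff every character lies in the set
theorem stripChars_eq_nil_iff (l chars : List Char) :
    PySem.Chars.stripChars l chars = [] ↔ ∀ c ∈ l, chars.contains c := by
  unfold PySem.Chars.stripChars
  constructor
  · intro h c hc
    have h1 : List.dropWhile (fun c => chars.contains c) (List.dropWhile (fun c => chars.contains c) l).reverse = [] := by
      simpa using congrArg List.reverse h
    have hdrop : ∀ x ∈ List.dropWhile (fun c => chars.contains c) l, chars.contains x := by
      intro x hx
      exact (List.dropWhile_eq_nil_iff.mp h1) x (List.mem_reverse.mpr hx)
    have htake : ∀ x ∈ List.takeWhile (fun c => chars.contains c) l, chars.contains x :=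
      fun x hx => List.mem_takeWhile_imp hx
    rw [← List.takeWhile_append_dropWhile (p := fun c => chars.contains c) (l := l)] at hc
    rcases List.mem_append.mp hc with h' | h'
    · exact htake c h'
    · exact hdrop c h'
  · intro h
    have hnil : List.dropWhile (fun c => chars.contains c) l = [] :=
      List.dropWhile_eq_nil_iff.mpr h
    show (List.dropWhile (fun c => chars.contains c) (List.dropWhile (fun c => chars.contains c) l).reverse).reverse = []
    rw [hnil, List.reverse_nil, List.dropWhile_nil, List.reverse_nil]

-- ===== VERDICT (by name: the statement is the Claim_ definition above) =====
theorem can_create_user_spec : Claim_equal_can_create_user := by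
  intro user_id _
  unfold Spec_can_create_user can_create_user can_create_user_alt
  have hr : reserved_usernames.contains user_id = false := rfl
  rw [hr, if_neg Bool.false_ne_true, if_neg Bool.false_ne_true, pvLoopA_eq_all]
  apply Bool.eq_iff_iff.mpr
  rw [List.all_eq_true, beq_iff_eq]
  constructor
  · intro hall
    have he : PySem.Chars.stripChars user_id.toList "abcdefghijklmnopqrstuvwxyz_0123456789".toList = [] :=
      (stripChars_eq_nil_iff _ _).mpr hall
    apply String.toList_inj.mp
    rw [PySem.Str.toList_stripChars, he]
    rfl
  · intro he
    apply (stripChars_eq_nil_iff _ _).mp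
    rw [← PySem.Str.toList_stripChars, he]
    rfl
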